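-- pv_equiv track=rewrite | github.com/kkr010128/codebert | problem296/problem296_120.py | tansaku
-- ===== SOURCE A (Python) =====
-- def tansaku(moji, n, m, k):
-- 	# n以上 m未満を探索する.
-- 	ansr = 0
-- 	cntt = 1
-- 	for i in range(n, m-1):
-- 		if moji[i] == moji[i + 1]:
-- 			cntt += 1
-- 		else:
-- 			ansr += (cntt // 2) * k
-- 			cntt = 1
-- 	ansr += (cntt // 2) * k
-- 	return ansr
-- ===== SOURCE B (Python) =====
-- def tansaku(moji, n, m, k):
--     # Greedily pair disjoint adjacent equal characters, each pair worth k: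
--     # within a run of length L greedy pairing yields exactly L // 2 pairs,
--     # and no pair crosses a run boundary.
--     ans = 0
--     i = n
--     while i + 1 < m:
--         if moji[i] == moji[i + 1]:
--             ans += k
--             i += 2
--         else:
--             i += 1
--     return ans
-- ===== Notes on version B (the rewrite author's own statement) =====
-- stated objective: alternative
-- what changed: B greedily pairs disjoint adjacent equal characters with a two-pointer skip (i += 2 on each match), adding k per pair, instead of A's run-length counter with (cntt // 2) * k boundary-flush logic; it never computes run lengths at all.
import Mathlib
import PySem

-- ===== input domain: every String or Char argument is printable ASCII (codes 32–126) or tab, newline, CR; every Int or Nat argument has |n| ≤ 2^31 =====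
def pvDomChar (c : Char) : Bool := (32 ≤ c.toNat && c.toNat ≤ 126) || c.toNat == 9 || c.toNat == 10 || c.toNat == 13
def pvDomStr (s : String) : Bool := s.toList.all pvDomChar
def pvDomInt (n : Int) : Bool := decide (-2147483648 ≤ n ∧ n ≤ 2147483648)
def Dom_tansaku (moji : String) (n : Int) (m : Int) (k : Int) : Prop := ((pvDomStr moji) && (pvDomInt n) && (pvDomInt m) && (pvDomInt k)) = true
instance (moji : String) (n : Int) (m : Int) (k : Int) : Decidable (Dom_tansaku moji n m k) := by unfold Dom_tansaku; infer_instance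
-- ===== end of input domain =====

-- B greedily pairs disjoint adjacent equal characters (two-pointer, i += 2 on a match),
-- adding k per pair; it never computes run lengths, unlike A's counter-and-flush scan.

-- ===== PORT A =====
-- A: ansr/cntt loop over i in range(n, m-1) comparing moji[i] with moji[i+1].
-- moji[i] is ported as (PySem.Str.pyGet? moji i).getD ' '; inside Pre_ every access is in range.
def tansaku (moji : String) (n : Int) (m : Int) (k : Int) : Int :=
  let st := (PySem.List.pyRange n (m - 1) 1).foldl
    (fun (st : Int × Int) (i : Int) =>
      if (PySem.Str.pyGet? moji i).getD ' ' = (PySem.Str.pyGet? moji (i + 1)).getD ' ' then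
        (st.1, st.2 + 1)
      else
        (st.1 + (PySem.Int.floordiv st.2 2) * k, 1))
    (0, 1)
  st.1 + (PySem.Int.floordiv st.2 2) * k

-- ===== PORT B =====
-- B's while loop: i advances by 2 past a matched pair (which earns k), by 1 otherwise.
def pvGreedy (moji : String) (m : Int) (k : Int) (i : Int) (ans : Int) : Int :=
  if h : i + 1 < m then
    if (PySem.Str.pyGet? moji i).getD ' ' = (PySem.Str.pyGet? moji (i + 1)).getD ' ' then
      pvGreedy moji m k (i + 2) (ans + k)
    else
      pvGreedy moji m k (i + 1) ans
  else ans
termination_by (m - i).toNat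
decreasing_by all_goals omega

def tansaku_alt (moji : String) (n : Int) (m : Int) (k : Int) : Int :=
  pvGreedy moji m k n 0

-- ===== PRECONDITION & SPEC =====
-- Pre_ is exactly the inputs where Python A returns: either the loop is empty, or every index
-- n..m-1 is a valid (possibly negative) Python index; elsewhere A raises IndexError.
def Pre_tansaku (moji : String) (n : Int) (m : Int) (k : Int) : Prop :=
  m ≤ n + 1 ∨ (-(PySem.Str.len moji) ≤ n ∧ m ≤ PySem.Str.len moji)
instance (moji : String) (n : Int) (m : Int) (k : Int) : Decidable (Pre_tansaku moji n m k) := by unfold Pre_tansaku; infer_instance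
def pvWitness_tansaku : String × Int × Int × Int := ("aabcc", 0, 5, 3)

def Spec_tansaku (moji : String) (n : Int) (m : Int) (k : Int) (out : Int) : Prop := out = tansaku_alt moji n m k
instance (moji : String) (n : Int) (m : Int) (k : Int) (out : Int) : Decidable (Spec_tansaku moji n m k out) := by unfold Spec_tansaku; infer_instance

-- ===== CLAIM (what is proved, stated in full; the proofs are below) =====
def Claim_equal_tansaku : Prop := ∀ (moji : String) (n : Int) (m : Int) (k : Int), Dom_tansaku moji n m k → Pre_tansaku moji n m k → Spec_tansaku moji n m k (tansaku moji n m k)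

-- ===== LEMMAS AND PROOFS =====

-- Abstract A-side scan: previous char c, pending run length cnt, accumulator ans.
def pvScan (k : Int) (c : Char) (xs : List Char) (ans cnt : Int) : Int :=
  match xs with
  | [] => ans + (PySem.Int.floordiv cnt 2) * k
  | x :: xs' =>
      if c = x then pvScan k x xs' ans (cnt + 1)
      else pvScan k x xs' (ans + (PySem.Int.floordiv cnt 2) * k) 1

-- Abstract B-side greedy pairing over the character list.
def pvG (k : Int) : List Char → Int
  | x :: y :: t => if x = y then k + pvG k t else pvG k (y :: t)
  | _ => 0

-- floordiv facts used below
theorem pvFd_succ_odd (c : Int) (h : c % 2 = 1) :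
    PySem.Int.floordiv (c + 1) 2 = PySem.Int.floordiv c 2 + 1 := by
  rw [PySem.Int.floordiv_eq_ediv_of_pos (by norm_num), PySem.Int.floordiv_eq_ediv_of_pos (by norm_num)]
  omega
theorem pvFd_succ_even (c : Int) (h : c % 2 = 0) :
    PySem.Int.floordiv (c + 1) 2 = PySem.Int.floordiv c 2 := by
  rw [PySem.Int.floordiv_eq_ediv_of_pos (by norm_num), PySem.Int.floordiv_eq_ediv_of_pos (by norm_num)]
  omega
theorem pvFd_one : PySem.Int.floordiv 1 2 = 0 := by decide

-- Core invariant: A's scan equals flushed pairs so far plus greedy pairing of the rest,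
-- where an odd pending count means the last char c is still unpaired for the greedy side.
theorem pvScan_eq_greedy (k : Int) (xs : List Char) :
    ∀ (c : Char) (ans cnt : Int),
      pvScan k c xs ans cnt =
        ans + (PySem.Int.floordiv cnt 2) * k +
          (if cnt % 2 = 1 then pvG k (c :: xs) else pvG k xs) := by
  induction xs with
  | nil =>
    intro c ans cnt
    simp only [pvScan]
    split_ifs <;> simp [pvG]
  | cons x xs' ih =>
    intro c ans cnt
    by_cases hcx : c = x
    · subst hcx
      rw [pvScan, if_pos rfl, ih]
      by_cases hp : cnt % 2 = 1
      · rw [pvFd_succ_odd cnt hp, if_pos hp, if_neg (by omega : ¬ (cnt + 1) % 2 = 1)]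
        have hG : pvG k (c :: c :: xs') = k + pvG k xs' := by rw [pvG, if_pos rfl]
        rw [hG]; ring
      · rw [pvFd_succ_even cnt (by omega), if_neg hp,
          if_pos (by omega : (cnt + 1) % 2 = 1)]
    · rw [pvScan, if_neg hcx, ih, pvFd_one]
      by_cases hp : cnt % 2 = 1
      · rw [if_pos hp, if_pos (by decide : (1:Int) % 2 = 1)]
        show _ = _ + (if c = x then k + pvG k xs' else pvG k (x :: xs'))
        rw [if_neg hcx]
        ring
      · rw [if_neg hp, if_pos (by decide : (1:Int) % 2 = 1)]
        ring

-- Finalisation of A's loop state.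
def pvFin (k : Int) (st : Int × Int) : Int := st.1 + (PySem.Int.floordiv st.2 2) * k

-- A's integer-range fold, expressed through pvScan.
theorem pvFold_eq_scan (moji : String) (k : Int) (j : Int) :
    ∀ (d : Nat) (i ans cnt : Int), (j - i).toNat = d →
      pvFin k ((PySem.List.pyRange i j 1).foldl
        (fun (st : Int × Int) (t : Int) =>
          if (PySem.Str.pyGet? moji t).getD ' ' = (PySem.Str.pyGet? moji (t + 1)).getD ' ' then
            (st.1, st.2 + 1)
          else
            (st.1 + (PySem.Int.floordiv st.2 2) * k, 1))
        (ans, cnt))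
      = pvScan k ((PySem.Str.pyGet? moji i).getD ' ')
          ((PySem.List.pyRange i j 1).map (fun t => (PySem.Str.pyGet? moji (t + 1)).getD ' '))
          ans cnt := by
  intro d
  induction d with
  | zero =>
    intro i ans cnt hd
    have hji : j ≤ i := by omega
    rw [PySem.List.pyRange_one_eq_nil hji]
    simp [pvFin, pvScan]
  | succ d ih =>
    intro i ans cnt hd
    have hij : i < j := by omega
    rw [PySem.List.pyRange_one_cons hij]
    simp only [List.foldl_cons, List.map_cons]
    rw [pvScan]
    by_cases h : (PySem.Str.pyGet? moji i).getD ' ' = (PySem.Str.pyGet? moji (i + 1)).getD ' '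
    · simp only [h, if_true]
      exact ih (i + 1) ans (cnt + 1) (by omega)
    · simp only [if_neg h]
      exact ih (i + 1) (ans + (PySem.Int.floordiv cnt 2) * k) 1 (by omega)

-- shift lemma for ranges
theorem pvRange_shift (a b : Int) :
    (PySem.List.pyRange a b 1).map (fun t => t + 1) = PySem.List.pyRange (a + 1) (b + 1) 1 := by
  simp [PySem.List.pyRange_one]
  intro x _
  ring

-- B's index-based greedy loop equals the abstract greedy pairing of the window's chars.
theorem pvGreedy_eq_pvG (moji : String) (m k : Int) :
    ∀ (d : Nat) (i ans : Int), (m - i).toNat = d →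
      pvGreedy moji m k i ans
        = ans + pvG k ((PySem.List.pyRange i m 1).map
            (fun t => (PySem.Str.pyGet? moji t).getD ' ')) := by
  intro d
  induction d using Nat.strong_induction_on with
  | _ d ih =>
    intro i ans hd
    by_cases h : i + 1 < m
    · have h1 : i < m := by omega
      rw [PySem.List.pyRange_one_cons h1, PySem.List.pyRange_one_cons h]
      simp only [List.map_cons]
      rw [pvGreedy, dif_pos h, pvG]
      by_cases he : (PySem.Str.pyGet? moji i).getD ' ' = (PySem.Str.pyGet? moji (i + 1)).getD ' '
      · simp only [if_pos he]
        have h2 : i + 1 + 1 = i + 2 := by ring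
        rw [h2, ih (m - (i + 2)).toNat (by omega) (i + 2) (ans + k) rfl]
        ring
      · simp only [if_neg he]
        have := ih (m - (i + 1)).toNat (by omega) (i + 1) ans rfl
        rw [PySem.List.pyRange_one_cons h] at this
        simp only [List.map_cons] at this
        rw [this]
    · rw [pvGreedy, dif_neg h]
      by_cases h2 : i < m
      · rw [PySem.List.pyRange_one_cons h2, PySem.List.pyRange_one_eq_nil (by omega : m ≤ i + 1)]
        simp [pvG]
      · rw [PySem.List.pyRange_one_eq_nil (by omega : m ≤ i)]
        simp [pvG]

-- ===== VERDICT (by name: the statement is the Claim_ definition above) =====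
theorem tansaku_spec : Claim_equal_tansaku := by
  intro moji n m k _ _
  show tansaku moji n m k = tansaku_alt moji n m k
  rw [tansaku_alt, pvGreedy_eq_pvG moji m k (m - n).toNat n 0 rfl, zero_add]
  by_cases hnm : m ≤ n + 1
  · rw [tansaku]
    rw [PySem.List.pyRange_one_eq_nil (by omega : m - 1 ≤ n)]
    by_cases h2 : n < m
    · rw [PySem.List.pyRange_one_cons h2, PySem.List.pyRange_one_eq_nil (by omega : m ≤ n + 1)]
      simp [pvG, PySem.Int.floordiv]
    · rw [PySem.List.pyRange_one_eq_nil (by omega : m ≤ n)]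
      simp [pvG, PySem.Int.floordiv]
  · have hn : n < m := by omega
    have key := pvFold_eq_scan moji k (m - 1) ((m - 1) - n).toNat n 0 1 rfl
    have htan : tansaku moji n m k
        = pvFin k ((PySem.List.pyRange n (m - 1) 1).foldl
            (fun (st : Int × Int) (t : Int) =>
              if (PySem.Str.pyGet? moji t).getD ' ' = (PySem.Str.pyGet? moji (t + 1)).getD ' ' then
                (st.1, st.2 + 1)
              else
                (st.1 + (PySem.Int.floordiv st.2 2) * k, 1))
            (0, 1)) := rfl
    rw [htan, key, pvScan_eq_greedy]
    have htail : (PySem.List.pyRange n (m - 1) 1).map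
          (fun t => (PySem.Str.pyGet? moji (t + 1)).getD ' ')
        = (PySem.List.pyRange (n + 1) m 1).map
            (fun i => (PySem.Str.pyGet? moji i).getD ' ') := by
      have h1 : (PySem.List.pyRange n (m - 1) 1).map
            (fun t => (PySem.Str.pyGet? moji (t + 1)).getD ' ')
          = ((PySem.List.pyRange n (m - 1) 1).map (fun t => t + 1)).map
              (fun i => (PySem.Str.pyGet? moji i).getD ' ') := by
        rw [List.map_map]; rfl
      rw [h1, pvRange_shift]
      have h2 : m - 1 + 1 = m := by ring
      rw [h2]
    rw [htail, if_pos (by decide : (1:Int) % 2 = 1), pvFd_one]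
    rw [PySem.List.pyRange_one_cons hn]
    simp only [List.map_cons]
    ring
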